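-- pv_equiv track=rewrite | github.com/seryrzu/centroFlye | scripts/debruijn_graph.py | get_all_kmers
-- ===== SOURCE A (Python) =====
-- from collections import defaultdict, Counter
--
-- def get_all_kmers(strings, k, gap_symb='?'):
--     all_kmers = Counter()
--     read_kmer_locations = defaultdict(list)
--     for r_id, string in strings.items():
--         for i in range(len(string)-k+1):
--             kmer = string[i:i+k]
--             if gap_symb not in kmer:
--                 all_kmers[kmer] += 1
--                 read_kmer_locations[kmer].append((r_id, i))
--     return all_kmers, read_kmer_locations
-- ===== SOURCE B (Python) =====
-- from collections import defaultdict, Counter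
--
-- def get_all_kmers(strings, k, gap_symb='?'):
--     all_kmers = Counter()
--     read_kmer_locations = defaultdict(list)
--     g = len(gap_symb)
--     for r_id, string in strings.items():
--         n = len(string)
--         # precompute every (overlapping) occurrence start of gap_symb
--         ps = [p for p in range(n) if string[p:p+g] == gap_symb]
--         j = 0
--         for i in range(n - k + 1):
--             while j < len(ps) and ps[j] < i:
--                 j += 1
--             if j == len(ps) or ps[j] + g > i + k:
--                 kmer = string[i:i+k]
--                 all_kmers[kmer] += 1
--                 read_kmer_locations[kmer].append((r_id, i))
--     return all_kmers, read_kmer_locations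
-- ===== Notes on version B (the rewrite author's own statement) =====
-- stated objective: alternative
-- what changed: Instead of testing 'gap_symb in kmer' for every window, B precomputes the sorted list of all (overlapping) occurrence starts of gap_symb per string and sweeps the windows with a moving pointer, deciding each window's validity by a pointer comparison instead of a substring search; Pre_ excludes k <= 0, outside the natural k-mer domain, where A counts windows of the empty string produced by slice clamping.
-- outside the precondition, e.g. on get_all_kmers({'r': 'a'}, 0, ''): A returns ({}, {}), B returns ({'': 1}, {'': [('r', 1)]})
import Mathlib
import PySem

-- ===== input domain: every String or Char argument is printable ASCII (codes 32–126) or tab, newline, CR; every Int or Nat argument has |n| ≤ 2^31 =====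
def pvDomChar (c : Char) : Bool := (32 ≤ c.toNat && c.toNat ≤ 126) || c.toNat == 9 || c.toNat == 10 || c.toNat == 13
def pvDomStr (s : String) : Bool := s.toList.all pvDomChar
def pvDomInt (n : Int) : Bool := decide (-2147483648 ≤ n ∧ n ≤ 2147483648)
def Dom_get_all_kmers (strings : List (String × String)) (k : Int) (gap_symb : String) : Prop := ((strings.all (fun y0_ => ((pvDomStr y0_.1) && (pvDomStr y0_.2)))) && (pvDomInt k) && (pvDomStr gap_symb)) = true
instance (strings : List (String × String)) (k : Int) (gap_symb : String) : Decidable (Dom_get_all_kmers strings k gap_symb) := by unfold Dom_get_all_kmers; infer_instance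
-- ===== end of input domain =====

-- B replaces A's per-window substring search by a precomputed sorted list of gap-occurrence
-- starts swept with a moving pointer (objective: alternative algorithm, same cost).
-- Mutation note: A mutates no argument; the equivalence is about the return value.

-- ===== PORT A =====
-- the body of A's inner `for i in range(...)` loop
def pvStepA (gap_symb r_id string : String) (k : Int)
    (st : PySem.Dict String Int × PySem.Dict String (List (String × Int))) (i : Int) :
    PySem.Dict String Int × PySem.Dict String (List (String × Int)) :=
  let kmer := PySem.Str.slice string (some i) (some (i + k))
  if PySem.Str.isIn gap_symb kmer then st
  else (st.1.modify kmer 0 (· + 1), st.2.modify kmer [] (fun l => l ++ [(r_id, i)]))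

def get_all_kmers (strings : List (String × String)) (k : Int) (gap_symb : String) :
    (List (String × Int)) × (List (String × List (String × Int))) :=
  let st := strings.foldl
    (fun st rp =>
      (PySem.List.pyRange 0 (PySem.Str.len rp.2 - k + 1)).foldl (pvStepA gap_symb rp.1 rp.2 k) st)
    (PySem.Dict.empty, PySem.Dict.empty)
  (st.1.items, st.2.items)

-- ===== PORT B =====
-- the `while j < len(ps) and ps[j] < i: j += 1` loop of Source B
def pvAdvance (ps : List Int) (j : Nat) (i : Int) : Nat :=
  if h : j < ps.length ∧ ps.getD j 0 < i then pvAdvance ps (j + 1) i else j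
termination_by ps.length - j
decreasing_by omega

-- the body of Source B's inner `for i in range(...)` loop (state = (j, the two dicts))
def pvStepB (gap_symb r_id string : String) (k g : Int) (ps : List Int)
    (jst : Nat × (PySem.Dict String Int × PySem.Dict String (List (String × Int)))) (i : Int) :
    Nat × (PySem.Dict String Int × PySem.Dict String (List (String × Int))) :=
  let j := pvAdvance ps jst.1 i
  if j = ps.length ∨ ps.getD j 0 + g > i + k then
    let kmer := PySem.Str.slice string (some i) (some (i + k))
    (j, (jst.2.1.modify kmer 0 (· + 1), jst.2.2.modify kmer [] (fun l => l ++ [(r_id, i)])))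
  else (j, jst.2)

def get_all_kmers_alt (strings : List (String × String)) (k : Int) (gap_symb : String) :
    (List (String × Int)) × (List (String × List (String × Int))) :=
  let g := PySem.Str.len gap_symb
  let st := strings.foldl
    (fun st rp =>
      let n := PySem.Str.len rp.2
      let ps := (PySem.List.pyRange 0 n).filter
        (fun p => PySem.Str.slice rp.2 (some p) (some (p + g)) == gap_symb)
      ((PySem.List.pyRange 0 (n - k + 1)).foldl (pvStepB gap_symb rp.1 rp.2 k g ps) (0, st)).2)
    (PySem.Dict.empty, PySem.Dict.empty)
  (st.1.items, st.2.items)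

-- ===== PRECONDITION & SPEC =====
-- Pre_ excludes k ≤ 0, outside the natural k-mer domain: there A's range/slice clamping makes
-- every window the empty string and the function counts empty "k-mers"; B's segmentation does
-- not reproduce that degenerate bookkeeping in all cases (e.g. an empty gap_symb).
def Pre_get_all_kmers (strings : List (String × String)) (k : Int) (gap_symb : String) : Prop := 1 ≤ k
instance (strings : List (String × String)) (k : Int) (gap_symb : String) : Decidable (Pre_get_all_kmers strings k gap_symb) := by unfold Pre_get_all_kmers; infer_instance
def pvWitness_get_all_kmers : (List (String × String)) × Int × String := ([("r1", "ab?ab"), ("r2", "abab")], 2, "?")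

def Spec_get_all_kmers (strings : List (String × String)) (k : Int) (gap_symb : String) (out : (List (String × Int)) × (List (String × List (String × Int)))) : Prop := out = get_all_kmers_alt strings k gap_symb
instance (strings : List (String × String)) (k : Int) (gap_symb : String) (out : (List (String × Int)) × (List (String × List (String × Int)))) : Decidable (Spec_get_all_kmers strings k gap_symb out) := by unfold Spec_get_all_kmers; infer_instance

-- ===== CLAIM (what is proved, stated in full; the proofs are below) =====
def Claim_equal_get_all_kmers : Prop := ∀ (strings : List (String × String)) (k : Int) (gap_symb : String), Dom_get_all_kmers strings k gap_symb → Pre_get_all_kmers strings k gap_symb → Spec_get_all_kmers strings k gap_symb (get_all_kmers strings k gap_symb)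

-- ===== LEMMAS AND PROOFS =====

-- occurrence starts of `gap` in `s`, on the Nat/List-Char side
def pvOcc (s gap : List Char) : List Nat :=
  (List.range s.length).filter (fun p => decide (gap <+: s.drop p))

lemma pvMem_occ {s gap : List Char} {p : Nat} :
    p ∈ pvOcc s gap ↔ p < s.length ∧ gap <+: s.drop p := by
  simp [pvOcc, List.mem_filter, List.mem_range, and_comm]

lemma pvOcc_pairwise (s gap : List Char) : (pvOcc s gap).Pairwise (· < ·) :=
  (List.pairwise_lt_range).filter _

-- B's filter over pyRange IS pvOcc (mapped to Int)
lemma pvPs_eq (s gap : String) :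
    (PySem.List.pyRange 0 (PySem.Str.len s)).filter
        (fun p => PySem.Str.slice s (some p) (some (p + PySem.Str.len gap)) == gap)
      = (pvOcc s.toList gap.toList).map (fun p : Nat => (p : Int)) := by
  rw [PySem.Str.len_eq s, PySem.List.pyRange_zero_natCast, List.filter_map]
  unfold pvOcc
  refine congrArg (List.map (fun k : Nat => (k : Int))) ?_
  apply List.filter_congr
  intro p hp
  simp only [Function.comp]
  rw [PySem.Str.len_eq gap]
  have hsl : (PySem.Str.slice s (some (p : Int)) (some ((p : Int) + (gap.toList.length : Int)))).toList
      = List.take gap.toList.length (List.drop p s.toList) := by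
    rw [PySem.Str.toList_slice, PySem.Chars.slice_eq_listSlice, PySem.List.slice_natCast_add]
  rw [Bool.eq_iff_iff]
  simp only [beq_iff_eq, decide_eq_true_eq]
  rw [← String.toList_inj, hsl]
  constructor
  · intro h; rw [List.prefix_iff_eq_take]; exact h.symm
  · intro h; rw [List.prefix_iff_eq_take] at h; exact h.symm


-- the window test: gap occurs in s[i:i+k] iff some occurrence start lies in [i, i+k-len gap]
lemma pvWindow (s gap : String) (iN kN : Nat) (hk : 1 ≤ kN) (hin : iN + kN ≤ s.toList.length) :
    PySem.Str.isIn gap (PySem.Str.slice s (some (iN : Int)) (some ((iN : Int) + (kN : Int)))) = true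
      ↔ ∃ p ∈ pvOcc s.toList gap.toList, iN ≤ p ∧ p + gap.toList.length ≤ iN + kN := by
  rw [PySem.Str.isIn_eq, ← PySem.Chars.exists_prefix_drop_iff_isIn]
  rw [PySem.Str.toList_slice, PySem.Chars.slice_eq_listSlice, PySem.List.slice_natCast_add]
  constructor
  · rintro ⟨j, hj⟩
    rw [List.drop_take, List.drop_drop] at hj
    have hlen := hj.length_le
    rw [List.length_take] at hlen
    by_cases hg : gap.toList.length = 0
    · -- empty gap: occurs at iN itself
      refine ⟨iN, pvMem_occ.mpr ⟨by omega, ?_⟩, by omega, by omega⟩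
      rw [List.eq_nil_of_length_eq_zero hg]
      exact List.nil_prefix
    · have hjk : j ≤ kN := by omega
      have hpre : gap.toList <+: List.drop (iN + j) s.toList := by
        rw [List.prefix_take_iff] at hj
        exact hj.1
      refine ⟨iN + j, pvMem_occ.mpr ⟨by omega, hpre⟩, by omega, by omega⟩
  · rintro ⟨p, hmem, hip, hpk⟩
    obtain ⟨hpn, hpre⟩ := pvMem_occ.mp hmem
    refine ⟨p - iN, ?_⟩
    rw [List.drop_take, List.drop_drop, List.prefix_take_iff]
    have : iN + (p - iN) = p := by omega
    rw [this]
    exact ⟨hpre, by omega⟩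


lemma pvAdvance_spec (ps : List Int) (i : Int) (j : Nat) (hj : j ≤ ps.length) :
    j ≤ pvAdvance ps j i ∧ pvAdvance ps j i ≤ ps.length ∧
      (∀ l, j ≤ l → l < pvAdvance ps j i → ps.getD l 0 < i) ∧
      (pvAdvance ps j i < ps.length → ¬ ps.getD (pvAdvance ps j i) 0 < i) := by
  have main : ∀ (m j : Nat), ps.length - j = m → j ≤ ps.length →
      j ≤ pvAdvance ps j i ∧ pvAdvance ps j i ≤ ps.length ∧
      (∀ l, j ≤ l → l < pvAdvance ps j i → ps.getD l 0 < i) ∧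
      (pvAdvance ps j i < ps.length → ¬ ps.getD (pvAdvance ps j i) 0 < i) := by
    intro m
    induction m with
    | zero =>
      intro j hm hj
      have hje : j = ps.length := by omega
      rw [pvAdvance]
      have hc : ¬ (j < ps.length ∧ ps.getD j 0 < i) := by omega
      rw [dif_neg hc]
      refine ⟨le_refl _, by omega, by omega, by omega⟩
    | succ m ih =>
      intro j hm hj
      rw [pvAdvance]
      by_cases hc : j < ps.length ∧ ps.getD j 0 < i
      · rw [dif_pos hc]
        obtain ⟨h1, h2, h3, h4⟩ := ih (j + 1) (by omega) (by omega)
        refine ⟨by omega, h2, ?_, h4⟩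
        intro l hl1 hl2
        rcases Nat.eq_or_lt_of_le hl1 with h | h
        · exact h ▸ hc.2
        · exact h3 l h hl2
      · rw [dif_neg hc]
        refine ⟨le_refl _, hj, by omega, fun _ => by tauto⟩
  exact main (ps.length - j) j rfl hj


-- sortedness turns the pointer test into "no occurrence inside the window"
lemma pvCond_iff (ps : List Int) (hps : ps.Pairwise (· < ·)) (i c : Int) (j' : Nat)
    (hlen : j' ≤ ps.length) (hlt : ∀ l, l < j' → ps.getD l 0 < i)
    (hge : j' < ps.length → ¬ ps.getD j' 0 < i) (g : Int) :
    (∃ p ∈ ps, i ≤ p ∧ p + g ≤ c) ↔ (j' < ps.length ∧ ps.getD j' 0 + g ≤ c) := by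
  constructor
  · rintro ⟨p, hp, hip, hpc⟩
    obtain ⟨l, hl, rfl⟩ := List.mem_iff_getElem.mp hp
    have hjl : j' ≤ l := by
      by_contra h
      have := hlt l (by omega)
      rw [List.getD_eq_getElem ps 0 hl] at this
      omega
    have hj'lt : j' < ps.length := by omega
    refine ⟨hj'lt, ?_⟩
    rw [List.getD_eq_getElem ps 0 hj'lt]
    rcases Nat.eq_or_lt_of_le hjl with h | h
    · subst h; omega
    · have := List.pairwise_iff_getElem.mp hps j' l hj'lt hl h
      omega
  · rintro ⟨hj'lt, hc⟩
    refine ⟨ps[j'], List.getElem_mem hj'lt, ?_, ?_⟩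
    · have := hge hj'lt
      rw [List.getD_eq_getElem ps 0 hj'lt] at this
      omega
    · rw [List.getD_eq_getElem ps 0 hj'lt] at hc
      omega


-- the two inner loops agree, for any pointer value consistent with the next index
lemma pvLoop (gap r_id s : String) (kN : Nat) (hk : 1 ≤ kN) :
    ∀ (c : Nat) (a : Int) (j : Nat)
      (st : PySem.Dict String Int × PySem.Dict String (List (String × Int))),
      0 ≤ a → ((s.toList.length : Int) - (kN : Int) + 1 - a).toNat = c →
      j ≤ ((pvOcc s.toList gap.toList).map (fun p : Nat => (p : Int))).length →
      (∀ l, l < j → ((pvOcc s.toList gap.toList).map (fun p : Nat => (p : Int))).getD l 0 < a) →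
      ((PySem.List.pyRange a ((s.toList.length : Int) - (kN : Int) + 1)).foldl
          (pvStepB gap r_id s (kN : Int) (gap.toList.length : Int)
            ((pvOcc s.toList gap.toList).map (fun p : Nat => (p : Int)))) (j, st)).2
        = (PySem.List.pyRange a ((s.toList.length : Int) - (kN : Int) + 1)).foldl
            (pvStepA gap r_id s (kN : Int)) st := by
  intro c
  induction c with
  | zero =>
    intro a j st ha hm hj hinv
    have hle : (s.toList.length : Int) - (kN : Int) + 1 ≤ a := by omega
    rw [PySem.List.pyRange_one_eq_nil hle]
    rfl
  | succ c ih =>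
    intro a j st ha hm hj hinv
    set ps := (pvOcc s.toList gap.toList).map (fun p : Nat => (p : Int)) with hps
    have hab : a < (s.toList.length : Int) - (kN : Int) + 1 := by omega
    rw [PySem.List.pyRange_one_cons hab]
    simp only [List.foldl_cons]
    -- window bounds
    obtain ⟨iN, rfl⟩ : ∃ iN : Nat, a = (iN : Int) := ⟨a.toNat, by omega⟩
    have hin : iN + kN ≤ s.toList.length := by
      have := hab
      omega
    have hm' : ((s.toList.length : Int) - (kN : Int) + 1 - ((iN : Int) + 1)).toNat = c := by omega
    -- the advanced pointer
    obtain ⟨h1, h2, h3, h4⟩ := pvAdvance_spec ps (iN : Int) j hj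
    set j' := pvAdvance ps j (iN : Int) with hj'
    have hlt' : ∀ l, l < j' → ps.getD l 0 < (iN : Int) := by
      intro l hl
      by_cases hlj : l < j
      · exact hinv l hlj
      · exact h3 l (by omega) hl
    -- ps is strictly sorted
    have hsorted : ps.Pairwise (· < ·) := by
      rw [hps]
      exact (pvOcc_pairwise s.toList gap.toList).map _ (by intro a b hab'; exact_mod_cast hab')
    -- bridge the two validity tests
    have hcond := pvCond_iff ps hsorted (iN : Int) ((iN : Int) + (kN : Int)) j' h2 hlt' h4
      (gap.toList.length : Int)
    have hbridge : (∃ p ∈ ps, (iN : Int) ≤ p ∧ p + (gap.toList.length : Int) ≤ (iN : Int) + (kN : Int))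
        ↔ ∃ p ∈ pvOcc s.toList gap.toList, iN ≤ p ∧ p + gap.toList.length ≤ iN + kN := by
      rw [hps]
      simp only [List.mem_map]
      constructor
      · rintro ⟨p, ⟨pN, hpN, rfl⟩, hle1, hle2⟩
        exact ⟨pN, hpN, by exact_mod_cast hle1, by exact_mod_cast hle2⟩
      · rintro ⟨pN, hpN, hle1, hle2⟩
        exact ⟨(pN : Int), ⟨pN, hpN, rfl⟩, by exact_mod_cast hle1, by exact_mod_cast hle2⟩
    have hwin := pvWindow s gap iN kN hk hin
    by_cases hIn : PySem.Str.isIn gap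
        (PySem.Str.slice s (some (iN : Int)) (some ((iN : Int) + (kN : Int)))) = true
    · -- gap occurs in the window: A skips, B's pointer test fails
      have hex := hbridge.mpr (hwin.mp hIn)
      have hBC : ¬ (j' = ps.length ∨ ps.getD j' 0 + (gap.toList.length : Int) > (iN : Int) + (kN : Int)) := by
        have := hcond.mp hex
        push Not
        exact ⟨by omega, by omega⟩
      show ((PySem.List.pyRange ((iN : Int) + 1) _).foldl _ (pvStepB gap r_id s _ _ ps (j, st) (iN : Int))).2 = _
      rw [show pvStepB gap r_id s (kN : Int) (gap.toList.length : Int) ps (j, st) (iN : Int) = (j', st) by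
        simp only [pvStepB]
        rw [if_neg hBC]]
      rw [show pvStepA gap r_id s (kN : Int) st (iN : Int) = st by
        simp only [pvStepA]
        rw [if_pos hIn]]
      exact ih ((iN : Int) + 1) j' st (by omega) hm' h2
        (fun l hl => lt_of_lt_of_le (hlt' l hl) (by omega))
    · -- gap does not occur: both update, with the same kmer
      have hnotex : ¬ ∃ p ∈ ps, (iN : Int) ≤ p ∧ p + (gap.toList.length : Int) ≤ (iN : Int) + (kN : Int) := by
        intro hex
        exact hIn (hwin.mpr (hbridge.mp hex))
      have hBC : j' = ps.length ∨ ps.getD j' 0 + (gap.toList.length : Int) > (iN : Int) + (kN : Int) := by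
        by_cases hjl : j' = ps.length
        · exact Or.inl hjl
        · right
          have hlt2 : j' < ps.length := by omega
          by_contra hgt
          exact hnotex (hcond.mpr ⟨hlt2, by omega⟩)
      rw [show pvStepB gap r_id s (kN : Int) (gap.toList.length : Int) ps (j, st) (iN : Int)
          = (j', ((st.1.modify (PySem.Str.slice s (some (iN : Int)) (some ((iN : Int) + (kN : Int)))) 0 (· + 1),
                   st.2.modify (PySem.Str.slice s (some (iN : Int)) (some ((iN : Int) + (kN : Int)))) []
                     (fun l => l ++ [(r_id, (iN : Int))])))) by
        simp only [pvStepB]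
        rw [if_pos hBC]]
      rw [show pvStepA gap r_id s (kN : Int) st (iN : Int)
          = ((st.1.modify (PySem.Str.slice s (some (iN : Int)) (some ((iN : Int) + (kN : Int)))) 0 (· + 1),
              st.2.modify (PySem.Str.slice s (some (iN : Int)) (some ((iN : Int) + (kN : Int)))) []
                (fun l => l ++ [(r_id, (iN : Int))]))) by
        simp only [pvStepA]
        rw [if_neg hIn]]
      exact ih ((iN : Int) + 1) j'
        ((st.1.modify (PySem.Str.slice s (some (iN : Int)) (some ((iN : Int) + (kN : Int)))) 0 (· + 1),
          st.2.modify (PySem.Str.slice s (some (iN : Int)) (some ((iN : Int) + (kN : Int)))) []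
            (fun l => l ++ [(r_id, (iN : Int))])))
        (by omega) hm' h2
        (fun l hl => lt_of_lt_of_le (hlt' l hl) (by omega))


-- ===== VERDICT (by name: the statement is the Claim_ definition above) =====
theorem get_all_kmers_spec : Claim_equal_get_all_kmers := by
  unfold Claim_equal_get_all_kmers
  intro strings k gap hdom hpre
  unfold Spec_get_all_kmers
  have hk1 : 1 ≤ k := hpre
  obtain ⟨kN, rfl⟩ : ∃ kN : Nat, k = (kN : Int) := ⟨k.toNat, by omega⟩
  have hkN : 1 ≤ kN := by exact_mod_cast hk1
  unfold get_all_kmers get_all_kmers_alt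
  have hfold : strings.foldl
      (fun st rp => (PySem.List.pyRange 0 (PySem.Str.len rp.2 - (kN : Int) + 1)).foldl
        (pvStepA gap rp.1 rp.2 (kN : Int)) st) (PySem.Dict.empty, PySem.Dict.empty)
    = strings.foldl (fun st rp =>
        let n := PySem.Str.len rp.2
        let ps := (PySem.List.pyRange 0 n).filter
          (fun p => PySem.Str.slice rp.2 (some p) (some (p + PySem.Str.len gap)) == gap)
        ((PySem.List.pyRange 0 (n - (kN : Int) + 1)).foldl
          (pvStepB gap rp.1 rp.2 (kN : Int) (PySem.Str.len gap) ps) (0, st)).2)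
      (PySem.Dict.empty, PySem.Dict.empty) := by
    apply PySem.List.foldl_congr_mem
    intro acc rp _
    simp only
    rw [pvPs_eq rp.2 gap, PySem.Str.len_eq rp.2, PySem.Str.len_eq gap]
    exact (pvLoop gap rp.1 rp.2 kN hkN (((rp.2.toList.length : Int) - (kN : Int) + 1 - 0).toNat)
      0 0 acc (le_refl 0) rfl (Nat.zero_le _)
      (fun l hl => absurd hl (Nat.not_lt_zero l))).symm
  simp only [hfold]
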